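-- pv_equiv track=rewrite | github.com/baker-laboratory/NA-MPNN | evaluation/na_eval_utils.py | chain_num_to_chain_id
-- ===== SOURCE A (Python) =====
-- def chain_num_to_chain_id(chain_num):
--     """
--     Given a number chain_num, converts the number to a chain ID of letters.
--     This uses "reverse spreadsheet style":
--       0, 1, ...
--       A, B, ..., Z, AA, BA, CA, ..., ZA, AB, BB, CB, ..., ZB, ...
--
--     Args:
--         chain_num (int): The number to convert to a chain ID. i starts at 0.
--
--     Returns:
--         chain_id (str): The chain ID corresponding to the number.
--     """
--     alphabet_length = 26
--
--     # This algorithm is similar to converting to base 26, but we need to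
--     # subtract 1 from the number since mapping A to 0 base 26 results in some
--     # issues (e.g. if A = 0 base 26, then AA = 00 base 26, which is not
--     # correct).
--     chain_letter_list = []
--     while chain_num >= 0:
--         chain_letter_list.append(chr(ord("A") + (chain_num % alphabet_length)))
--         chain_num = (chain_num // 26) - 1
--
--     chain_id = "".join(chain_letter_list)
--     return chain_id
-- ===== SOURCE B (Python) =====
-- def _bij(m):
--     """Bijective base-26 digits of m, least significant first."""
--     if m <= 0:
--         return ""
--     q, r = divmod(m - 1, 26)
--     return chr(ord("A") + r) + _bij(q)
--
--
-- def chain_num_to_chain_id(chain_num):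
--     # Shift to the one-based value used by bijective base-26 numeration.
--     return _bij(chain_num + 1)
-- ===== Notes on version B (the rewrite author's own statement) =====
-- stated objective: alternative
-- what changed: Recasts the problem as bijective base-26 numeration of the shifted value chain_num+1: a recursive helper with a m>0 guard and divmod(m-1,26) prepending each digit, instead of A's while chain_num>=0 loop with the n//26-1 decrement, a list accumulator and a final join.
import Mathlib
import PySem

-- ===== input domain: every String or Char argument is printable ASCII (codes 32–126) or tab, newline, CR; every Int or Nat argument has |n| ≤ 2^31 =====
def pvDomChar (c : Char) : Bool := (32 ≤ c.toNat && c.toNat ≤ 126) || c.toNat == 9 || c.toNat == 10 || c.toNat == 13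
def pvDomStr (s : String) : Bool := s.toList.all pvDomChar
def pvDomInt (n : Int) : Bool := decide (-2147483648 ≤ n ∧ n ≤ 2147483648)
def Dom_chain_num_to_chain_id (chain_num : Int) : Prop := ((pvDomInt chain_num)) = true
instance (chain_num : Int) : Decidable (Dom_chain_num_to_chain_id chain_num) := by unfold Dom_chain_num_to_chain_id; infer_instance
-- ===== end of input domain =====

-- B recasts the task as bijective base-26 numeration of chain_num+1 (objective: alternative).

-- ===== PORT A =====
-- Python appends 1-char strings to a list and ''.joins it; ported exactly as a
-- List Char accumulator joined by String.ofList at the end.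
def pvChainLoop (chain_num : Int) (chain_letter_list : List Char) : List Char :=
  if _h : chain_num ≥ 0 then
    pvChainLoop (PySem.Int.floordiv chain_num 26 - 1)
      (chain_letter_list ++ [Char.ofNat (65 + (PySem.Int.mod chain_num 26)).toNat])
  else chain_letter_list
termination_by (chain_num + 1).toNat
decreasing_by
  have h26 : PySem.Int.floordiv chain_num 26 = chain_num / 26 :=
    PySem.Int.floordiv_eq_ediv_of_pos (by norm_num)
  have h1 : chain_num / 26 ≤ chain_num := Int.ediv_le_self _ (by omega)
  have h2 : 0 ≤ chain_num / 26 := Int.ediv_nonneg (by omega) (by norm_num)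
  omega

def chain_num_to_chain_id (chain_num : Int) : String :=
  String.ofList (pvChainLoop chain_num [])

-- ===== PORT B =====
-- Helper _bij: divmod(m-1, 26) with the literal divisor 26 is exact, so the
-- q, r pair is ported as the floordiv/mod pair.
def pvBij (m : Int) : String :=
  if _hm : m ≤ 0 then ""
  else
    let q := PySem.Int.floordiv (m - 1) 26
    let r := PySem.Int.mod (m - 1) 26
    String.singleton (Char.ofNat (65 + r).toNat) ++ pvBij q
termination_by m.toNat
decreasing_by
  have hq : PySem.Int.floordiv (m - 1) 26 = (m - 1) / 26 :=
    PySem.Int.floordiv_eq_ediv_of_pos (by norm_num)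
  have hle : (m - 1) / 26 ≤ m - 1 := Int.ediv_le_self _ (by omega)
  omega

def chain_num_to_chain_id_alt (chain_num : Int) : String :=
  pvBij (chain_num + 1)

-- ===== PRECONDITION & SPEC =====
def Spec_chain_num_to_chain_id (chain_num : Int) (out : String) : Prop := out = chain_num_to_chain_id_alt chain_num
instance (chain_num : Int) (out : String) : Decidable (Spec_chain_num_to_chain_id chain_num out) := by unfold Spec_chain_num_to_chain_id; infer_instance

-- ===== CLAIM (what is proved, stated in full; the proofs are below) =====
def Claim_equal_chain_num_to_chain_id : Prop := ∀ (chain_num : Int), Dom_chain_num_to_chain_id chain_num → Spec_chain_num_to_chain_id chain_num (chain_num_to_chain_id chain_num)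

-- ===== LEMMAS AND PROOFS =====
theorem pvChainLoop_eq_bij (chain_num : Int) (acc : List Char) :
    pvChainLoop chain_num acc = acc ++ (pvBij (chain_num + 1)).toList := by
  unfold pvChainLoop pvBij
  by_cases h : chain_num ≥ 0
  · rw [dif_pos h, dif_neg (by omega)]
    rw [pvChainLoop_eq_bij (PySem.Int.floordiv chain_num 26 - 1)]
    have : chain_num + 1 - 1 = chain_num := by omega
    simp [this, String.singleton]
  · rw [dif_neg h, dif_pos (by omega)]
    simp
termination_by (chain_num + 1).toNat
decreasing_by
  have h26 : PySem.Int.floordiv chain_num 26 = chain_num / 26 :=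
    PySem.Int.floordiv_eq_ediv_of_pos (by norm_num)
  have h1 : chain_num / 26 ≤ chain_num := Int.ediv_le_self _ (by omega)
  have h2 : 0 ≤ chain_num / 26 := Int.ediv_nonneg (by omega) (by norm_num)
  omega

-- ===== VERDICT (by name: the statement is the Claim_ definition above) =====
theorem chain_num_to_chain_id_spec : Claim_equal_chain_num_to_chain_id := by
  intro chain_num _
  unfold Spec_chain_num_to_chain_id chain_num_to_chain_id chain_num_to_chain_id_alt
  rw [pvChainLoop_eq_bij]
  simp
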